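-- pv_equiv track=rewrite | github.com/Krithick7/Password-Based-Key-Derivation-Tool | password_kdf_tool/password_kdf_module.py | _character_pool_size
-- ===== SOURCE A (Python) =====
-- import string
--
-- def _character_pool_size(password: str) -> int:
--     """Estimate effective character pool size from character categories used."""
--     pool = 0
--     if any(c.islower() for c in password):
--         pool += 26
--     if any(c.isupper() for c in password):
--         pool += 26
--     if any(c.isdigit() for c in password):
--         pool += 10
--     if any(c in string.punctuation for c in password):
--         pool += len(string.punctuation)
--     if any(c.isspace() for c in password):
--         pool += 1
--     return max(pool, 1)
-- ===== SOURCE B (Python) =====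
-- import string
--
-- def _character_pool_size(password: str) -> int:
--     """Estimate effective character pool size from character categories used."""
--     # One pass over the password building presence flags, then one weighted sum.
--     lower = upper = digit = punct = space = False
--     for c in password:
--         if c.islower():
--             lower = True
--         if c.isupper():
--             upper = True
--         if c.isdigit():
--             digit = True
--         if c in string.punctuation:
--             punct = True
--         if c.isspace():
--             space = True
--     pool = ((26 if lower else 0)
--             + (26 if upper else 0)
--             + (10 if digit else 0)
--             + (len(string.punctuation) if punct else 0)
--             + (1 if space else 0))
--     return max(pool, 1)
-- ===== Notes on version B (the rewrite author's own statement) =====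
-- stated objective: alternative
-- what changed: A makes five separate any(...) scans over the password, one per character category; B makes a single pass that accumulates five presence flags and then computes one weighted sum from them.
import Mathlib
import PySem

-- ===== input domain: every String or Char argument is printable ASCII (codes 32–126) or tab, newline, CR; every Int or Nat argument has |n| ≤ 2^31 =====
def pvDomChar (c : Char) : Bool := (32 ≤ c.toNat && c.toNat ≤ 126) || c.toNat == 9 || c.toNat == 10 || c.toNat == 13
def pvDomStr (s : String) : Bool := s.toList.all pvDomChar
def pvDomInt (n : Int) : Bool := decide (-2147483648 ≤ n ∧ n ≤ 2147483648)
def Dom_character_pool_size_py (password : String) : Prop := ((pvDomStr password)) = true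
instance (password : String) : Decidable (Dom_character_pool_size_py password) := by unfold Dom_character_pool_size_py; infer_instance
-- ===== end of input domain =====

-- B replaces A's five separate any(...) scans over the password with a single
-- pass accumulating five presence flags followed by one weighted sum (alternative decomposition).


-- string.punctuation
def pyPunctuation : List Char := "!\"#$%&'()*+,-./:;<=>?@[\\]^_`{|}~".toList

-- ===== PORT A =====
def character_pool_size_py (password : String) : Int :=
  let cs := password.toList
  let pool : Int := 0
  let pool := if cs.any (fun c => PySem.Chars.islower c) then pool + 26 else pool
  let pool := if cs.any (fun c => PySem.Chars.isupper c) then pool + 26 else pool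
  let pool := if cs.any (fun c => PySem.Chars.isdigit c) then pool + 10 else pool
  let pool := if cs.any (fun c => pyPunctuation.contains c) then pool + (pyPunctuation.length : Int) else pool
  let pool := if cs.any (fun c => PySem.Chars.isspace c) then pool + 1 else pool
  max pool 1

-- ===== PORT B =====
-- the loop body of Source B: update the five presence flags for one character
def pvUpdFlags (st : Bool × Bool × Bool × Bool × Bool) (c : Char) : Bool × Bool × Bool × Bool × Bool :=
  let l := if PySem.Chars.islower c then true else st.1
  let u := if PySem.Chars.isupper c then true else st.2.1
  let d := if PySem.Chars.isdigit c then true else st.2.2.1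
  let p := if pyPunctuation.contains c then true else st.2.2.2.1
  let s := if PySem.Chars.isspace c then true else st.2.2.2.2
  (l, u, d, p, s)

def character_pool_size_py_alt (password : String) : Int :=
  let f := password.toList.foldl pvUpdFlags (false, false, false, false, false)
  let pool : Int :=
    (if f.1 then 26 else 0) + (if f.2.1 then 26 else 0) + (if f.2.2.1 then 10 else 0)
      + (if f.2.2.2.1 then (pyPunctuation.length : Int) else 0) + (if f.2.2.2.2 then 1 else 0)
  max pool 1

-- ===== PRECONDITION & SPEC =====
def Spec_character_pool_size_py (password : String) (out : Int) : Prop := out = character_pool_size_py_alt password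
instance (password : String) (out : Int) : Decidable (Spec_character_pool_size_py password out) := by unfold Spec_character_pool_size_py; infer_instance

-- ===== CLAIM (what is proved, stated in full; the proofs are below) =====
def Claim_equal_character_pool_size_py : Prop := ∀ (password : String), Dom_character_pool_size_py password → Spec_character_pool_size_py password (character_pool_size_py password)

-- ===== LEMMAS AND PROOFS =====
-- the one-pass flag fold computes exactly the five any-scans
lemma pvFoldFlags (cs : List Char) (l u d p s : Bool) :
    cs.foldl pvUpdFlags (l, u, d, p, s) =
      (l || cs.any (fun c => PySem.Chars.islower c),
       u || cs.any (fun c => PySem.Chars.isupper c),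
       d || cs.any (fun c => PySem.Chars.isdigit c),
       p || cs.any (fun c => pyPunctuation.contains c),
       s || cs.any (fun c => PySem.Chars.isspace c)) := by
  induction cs generalizing l u d p s with
  | nil => simp
  | cons c t ih =>
    simp only [List.foldl_cons, List.any_cons, pvUpdFlags, ih]
    by_cases h1 : PySem.Chars.islower c <;>
      by_cases h2 : PySem.Chars.isupper c <;>
        by_cases h3 : PySem.Chars.isdigit c <;>
          by_cases h4 : pyPunctuation.contains c <;>
            by_cases h5 : PySem.Chars.isspace c <;>
              simp [h1, h2, h3, h4, h5, Bool.or_assoc, Bool.or_left_comm]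

-- ===== VERDICT (by name: the statement is the Claim_ definition above) =====
theorem character_pool_size_py_spec : Claim_equal_character_pool_size_py := by
  intro password _
  unfold Spec_character_pool_size_py character_pool_size_py character_pool_size_py_alt
  simp only [pvFoldFlags, Bool.false_or]
  cases h1 : password.toList.any (fun c => PySem.Chars.islower c) <;>
    cases h2 : password.toList.any (fun c => PySem.Chars.isupper c) <;>
      cases h3 : password.toList.any (fun c => PySem.Chars.isdigit c) <;>
        cases h4 : password.toList.any (fun c => pyPunctuation.contains c) <;>
          cases h5 : password.toList.any (fun c => PySem.Chars.isspace c) <;>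
            simp
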